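-- pv_equiv track=rewrite | github.com/freelawproject/courtlistener | cl/custom_filters/templatetags/partition_util.py | rows_distributed
-- ===== SOURCE A (Python) =====
-- from collections.abc import Iterable
-- from typing import TypeVar
--
-- T = TypeVar("T")
--
-- def rows_distributed(thelist: Iterable[T], n: int | str) -> list[list[T]]:
--     """
--     Break a list into ``n`` rows, distributing columns as evenly as possible
--     across the rows. For example::
--
--         >>> l = range(10)
--
--         >>> rows_distributed(l, 2)
--         [[0, 1, 2, 3, 4], [5, 6, 7, 8, 9]]
--
--         >>> rows_distributed(l, 3)
--         [[0, 1, 2, 3], [4, 5, 6], [7, 8, 9]]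
--
--         >>> rows_distributed(l, 4)
--         [[0, 1, 2], [3, 4, 5], [6, 7], [8, 9]]
--
--         >>> rows_distributed(l, 5)
--         [[0, 1], [2, 3], [4, 5], [6, 7], [8, 9]]
--
--         >>> rows_distributed(l, 9)
--         [[0, 1], [2], [3], [4], [5], [6], [7], [8], [9]]
--
--         # This filter will always return `n` rows, even if some are empty:
--         >>> rows(range(2), 3)
--         [[0], [1], []]
--     """
--     try:
--         n = int(n)
--         items = list(thelist)
--     except (ValueError, TypeError):
--         return [list(thelist)]
--     list_len = len(items)
--     split = list_len // n
--
--     remainder = list_len % n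
--     offset = 0
--     result_rows: list[list[T]] = []
--     for i in range(n):
--         if remainder:
--             start, end = (split + 1) * i, (split + 1) * (i + 1)
--         else:
--             start, end = split * i + offset, split * (i + 1) + offset
--         result_rows.append(items[start:end])
--         if remainder:
--             remainder -= 1
--             offset += 1
--     return result_rows
-- ===== SOURCE B (Python) =====
-- def rows_distributed(thelist, n):
--     try:
--         n = int(n)
--         items = list(thelist)
--     except (ValueError, TypeError):
--         return [list(thelist)]
--     split = len(items) // n
--     remainder = len(items) % n
--     sizes = [split + (1 if i < remainder else 0) for i in range(n)]
--     rows = []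
--     rest = items
--     for size in sizes:
--         rows.append(rest[:size])
--         rest = rest[size:]
--     return rows
-- ===== Notes on version B (the rewrite author's own statement) =====
-- stated objective: simpler
-- what changed: Replaces A's remainder/offset state machine with branching boundary arithmetic by a precomputed row-size table (first len%n rows get one extra item) plus a single streaming pass that peels each row off the front of the list; Pre_ excludes only n parsing to integer 0, where both raise ZeroDivisionError.
import Mathlib
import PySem

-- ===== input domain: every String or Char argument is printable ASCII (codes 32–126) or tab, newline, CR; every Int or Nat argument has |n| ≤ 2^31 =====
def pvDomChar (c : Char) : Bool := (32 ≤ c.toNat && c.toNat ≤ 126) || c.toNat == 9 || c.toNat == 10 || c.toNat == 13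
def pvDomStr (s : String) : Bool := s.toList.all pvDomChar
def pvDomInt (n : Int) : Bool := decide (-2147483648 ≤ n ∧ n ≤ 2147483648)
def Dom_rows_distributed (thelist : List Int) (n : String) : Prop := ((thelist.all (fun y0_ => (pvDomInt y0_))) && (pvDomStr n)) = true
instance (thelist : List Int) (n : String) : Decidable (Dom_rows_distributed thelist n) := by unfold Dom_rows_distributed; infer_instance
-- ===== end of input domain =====

-- B replaces A's remainder/offset slicing state machine by a size table plus one streaming
-- take/drop pass (objective: simpler).

-- ===== PORT A =====
def rows_distributed (thelist : List Int) (n : String) : List (List Int) :=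
  match PySem.Int.ofStr? n with
  | none => [thelist]                       -- except (ValueError, TypeError): return [list(thelist)]
  | some nv =>
    let items := thelist
    let listLen : Int := (items.length : Int)
    let split := PySem.Int.floordiv listLen nv
    let st := (PySem.List.pyRange 0 nv 1).foldl
      (fun (st : Int × Int × List (List Int)) i =>
        if st.1 ≠ 0 then
          (st.1 - 1, st.2.1 + 1,
            st.2.2 ++ [PySem.List.slice items (some ((split + 1) * i)) (some ((split + 1) * (i + 1)))])
        else
          (st.1, st.2.1,
            st.2.2 ++ [PySem.List.slice items (some (split * i + st.2.1)) (some (split * (i + 1) + st.2.1))]))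
      (PySem.Int.mod listLen nv, 0, [])
    st.2.2

-- ===== PORT B =====
def rows_distributed_alt (thelist : List Int) (n : String) : List (List Int) :=
  match PySem.Int.ofStr? n with
  | none => [thelist]
  | some nv =>
    let items := thelist
    let split := PySem.Int.floordiv (items.length : Int) nv
    let remainder := PySem.Int.mod (items.length : Int) nv
    let sizes := (PySem.List.pyRange 0 nv 1).map (fun i => split + if i < remainder then 1 else 0)
    let st := sizes.foldl
      (fun (st : List Int × List (List Int)) s =>
        (PySem.List.slice st.1 (some s) none, st.2 ++ [PySem.List.slice st.1 none (some s)]))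
      (items, [])
    st.2

-- ===== PRECONDITION & SPEC =====
-- Pre_ excludes exactly the inputs where int(n) == 0: there Python A (and B) raise ZeroDivisionError.
def Pre_rows_distributed (thelist : List Int) (n : String) : Prop :=
  PySem.Int.ofStr? n ≠ some 0
instance (thelist : List Int) (n : String) : Decidable (Pre_rows_distributed thelist n) := by
  unfold Pre_rows_distributed; infer_instance

def pvWitness_rows_distributed : List Int × String := ([1, 2, 3], "2")

def Spec_rows_distributed (thelist : List Int) (n : String) (out : List (List Int)) : Prop := out = rows_distributed_alt thelist n
instance (thelist : List Int) (n : String) (out : List (List Int)) : Decidable (Spec_rows_distributed thelist n out) := by unfold Spec_rows_distributed; infer_instance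

-- ===== CLAIM (what is proved, stated in full; the proofs are below) =====
def Claim_equal_rows_distributed : Prop := ∀ (thelist : List Int) (n : String), Dom_rows_distributed thelist n → Pre_rows_distributed thelist n → Spec_rows_distributed thelist n (rows_distributed thelist n)

-- ===== LEMMAS AND PROOFS =====

-- The two loops, run over the same index range [a, a+k), agree given the state invariant:
-- A's state is (r0 - min a r0, min a r0, R); B's remaining list is items dropped past
-- position split*a + min a r0.
lemma pv_loop_eq (items : List Int) (split r0 : Int) (hs : 0 ≤ split) (hr : 0 ≤ r0)
    (k : Nat) : ∀ (a : Int), 0 ≤ a → ∀ (R : List (List Int)),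
    ((PySem.List.pyRange a (a + (k : Int)) 1).foldl
      (fun (st : Int × Int × List (List Int)) i =>
        if st.1 ≠ 0 then
          (st.1 - 1, st.2.1 + 1,
            st.2.2 ++ [PySem.List.slice items (some ((split + 1) * i)) (some ((split + 1) * (i + 1)))])
        else
          (st.1, st.2.1,
            st.2.2 ++ [PySem.List.slice items (some (split * i + st.2.1)) (some (split * (i + 1) + st.2.1))]))
      (r0 - min a r0, min a r0, R)).2.2
    = ((PySem.List.pyRange a (a + (k : Int)) 1).foldl
      (fun (st : List Int × List (List Int)) i =>
        ((fun s => (PySem.List.slice st.1 (some s) none, st.2 ++ [PySem.List.slice st.1 none (some s)]))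
          (split + if i < r0 then 1 else 0)))
      (items.drop (split * a + min a r0).toNat, R)).2 := by
  induction k with
  | zero =>
      intro a ha R
      rw [PySem.List.pyRange_one_eq_nil (by simp)]
      rfl
  | succ k ih =>
      intro a ha R
      have hcons : PySem.List.pyRange a (a + ((k + 1 : Nat) : Int)) 1
          = a :: PySem.List.pyRange (a + 1) (a + ((k + 1 : Nat) : Int)) 1 :=
        PySem.List.pyRange_one_cons (by push_cast; omega)
      have hrange : a + ((k + 1 : Nat) : Int) = (a + 1) + (k : Int) := by push_cast; ring
      have hsa : 0 ≤ split * a := mul_nonneg hs ha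
      have hsa1 : split * (a + 1) = split * a + split := by ring
      have hA1 : (split + 1) * a = split * a + a := by ring
      have hA2 : (split + 1) * (a + 1) = split * a + a + split + 1 := by ring
      rw [hcons]
      simp only [List.foldl_cons]
      by_cases hlt : a < r0
      · have hmin : min a r0 = a := by omega
        have hmin' : min (a + 1) r0 = a + 1 := by omega
        have hne : r0 - min a r0 ≠ 0 := by omega
        rw [if_pos (by simpa [hmin] using hne), if_pos hlt]
        have hrow :
            PySem.List.slice items (some ((split + 1) * a)) (some ((split + 1) * (a + 1)))
            = PySem.List.slice (items.drop (split * a + min a r0).toNat) none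
                (some (split + 1)) := by
          rw [PySem.List.slice_toNat items (by omega) (by omega),
              PySem.List.slice_to _ (by omega), hmin, hA1, hA2]
          congr 1
          omega
        have hrest :
            PySem.List.slice (items.drop (split * a + min a r0).toNat) (some (split + 1)) none
            = items.drop (split * (a + 1) + min (a + 1) r0).toNat := by
          rw [PySem.List.slice_from _ (by omega), List.drop_drop, hmin, hmin', hsa1]
          congr 1
          omega
        have hst1 : r0 - min a r0 - 1 = r0 - min (a + 1) r0 := by omega
        have hst2 : min a r0 + 1 = min (a + 1) r0 := by omega
        rw [hrow, hrest, hst1, hst2, hrange]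
        exact ih (a + 1) (by omega) _
      · have hmin : min a r0 = r0 := by omega
        have hmin' : min (a + 1) r0 = r0 := by omega
        have hz : r0 - min a r0 = 0 := by omega
        rw [if_neg (by simp [hz]), if_neg hlt]
        have hrow :
            PySem.List.slice items (some (split * a + min a r0)) (some (split * (a + 1) + min a r0))
            = PySem.List.slice (items.drop (split * a + min a r0).toNat) none
                (some (split + 0)) := by
          rw [PySem.List.slice_toNat items (by omega) (by omega),
              PySem.List.slice_to _ (by omega), hmin, hsa1]
          congr 1
          omega
        have hrest :
            PySem.List.slice (items.drop (split * a + min a r0).toNat) (some (split + 0)) none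
            = items.drop (split * (a + 1) + min (a + 1) r0).toNat := by
          rw [PySem.List.slice_from _ (by omega), List.drop_drop, hmin, hmin', hsa1]
          congr 1
          omega
        have hz' : r0 - min a r0 = r0 - min (a + 1) r0 := by omega
        have hm : min a r0 = min (a + 1) r0 := by omega
        rw [hrow, hrest, hz', hm, hrange]
        exact ih (a + 1) (by omega) _

-- ===== VERDICT (by name: the statement is the Claim_ definition above) =====
theorem rows_distributed_spec : Claim_equal_rows_distributed := by
  intro thelist n _hdom hpre
  unfold Spec_rows_distributed rows_distributed rows_distributed_alt
  cases h : PySem.Int.ofStr? n with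
  | none => rfl
  | some nv =>
      simp only []
      rw [List.foldl_map]
      rcases lt_trichotomy nv 0 with hneg | hzero | hpos
      · rw [PySem.List.pyRange_one_eq_nil (by omega)]
        rfl
      · exact absurd (h.trans (by rw [hzero])) hpre
      · have hs : 0 ≤ PySem.Int.floordiv (thelist.length : Int) nv := by
          rw [PySem.Int.le_floordiv_iff_mul_le hpos]
          simp
        have hr0 : 0 ≤ PySem.Int.mod (thelist.length : Int) nv := PySem.Int.mod_nonneg _ hpos
        have key := pv_loop_eq thelist (PySem.Int.floordiv (thelist.length : Int) nv)
          (PySem.Int.mod (thelist.length : Int) nv) hs hr0 nv.toNat 0 le_rfl []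
        rw [show (0 : Int) + (nv.toNat : Int) = nv by omega, min_eq_left hr0] at key
        simp only [mul_zero, add_zero, sub_zero, Int.toNat_zero, List.drop_zero] at key
        exact key
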